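-- pv_equiv track=rewrite | github.com/Rhino010/TestGit | Chapter_4.py/code_wars_9/9.py | count_photos
-- ===== SOURCE A (Python) =====
-- def count_photos(road):
--
--     right= 0
--     left = 0
--     period = 0
--     count = 0
--
--     for i in road:
--         if i == '>':
--             right += 1
--         elif i =='<':
--             left += 1
--             count += period
--         elif i == '.':
--             count += right
--             period += 1
--
--     return count
-- ===== SOURCE B (Python) =====
-- def count_photos(road):
--     # prefix tables: pr[i] = count of '>' before i, pd[i] = count of '.' before i
--     pr = [0]
--     for c in road:
--         pr.append(pr[-1] + (1 if c == '>' else 0))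
--     pd = [0]
--     for c in road:
--         pd.append(pd[-1] + (1 if c == '.' else 0))
--     total = 0
--     for c, r, p in zip(road, pr, pd):
--         if c == '.':
--             total += r
--         elif c == '<':
--             total += p
--     return total
-- ===== Notes on version B (the rewrite author's own statement) =====
-- stated objective: alternative
-- what changed: Replaces A's single interleaved running-counter loop with two prefix-count tables ('>' and '.') built first, followed by a separate scoring pass that zips the road with the tables.
import Mathlib
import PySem

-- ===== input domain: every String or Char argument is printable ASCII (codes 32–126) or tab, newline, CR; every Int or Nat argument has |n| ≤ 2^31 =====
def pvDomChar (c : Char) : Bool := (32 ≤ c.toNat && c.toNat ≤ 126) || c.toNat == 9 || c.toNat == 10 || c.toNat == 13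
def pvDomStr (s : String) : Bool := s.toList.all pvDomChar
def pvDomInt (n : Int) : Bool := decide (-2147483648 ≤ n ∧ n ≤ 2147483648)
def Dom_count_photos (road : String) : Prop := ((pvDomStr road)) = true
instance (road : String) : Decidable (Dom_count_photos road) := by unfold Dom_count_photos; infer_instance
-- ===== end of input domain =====

-- B replaces A's interleaved running-counter loop by prefix-count tables plus a separate
-- zipped scoring pass (alternative decomposition, same O(n) cost); A's unused second counter is dropped.

-- ===== PORT A =====
-- state (right, left, period, count), exactly A's loop
def count_photos (road : String) : Int :=
  (road.toList.foldl
    (fun (st : Int × Int × Int × Int) i =>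
      let (right, left, period, count) := st
      if i = '>' then (right + 1, left, period, count)
      else if i = '<' then (right, left + 1, period, count + period)
      else if i = '.' then (right, left, period + 1, count + right)
      else st)
    (0, 0, 0, 0)).2.2.2

-- ===== PORT B =====
-- prefix tables built as scans (pr: '>' before i, pd: '.' before i), then a zipped scoring pass
def count_photos_alt (road : String) : Int :=
  let l := road.toList
  let pr := l.scanl (fun a c => a + (if c = '>' then (1 : Int) else 0)) 0
  let pd := l.scanl (fun a c => a + (if c = '.' then (1 : Int) else 0)) 0
  (l.zip (pr.zip pd)).foldl
    (fun (total : Int) crp =>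
      if crp.1 = '.' then total + crp.2.1
      else if crp.1 = '<' then total + crp.2.2
      else total)
    0

-- ===== PRECONDITION & SPEC =====
def Spec_count_photos (road : String) (out : Int) : Prop := out = count_photos_alt road
instance (road : String) (out : Int) : Decidable (Spec_count_photos road out) := by unfold Spec_count_photos; infer_instance

-- ===== CLAIM (what is proved, stated in full; the proofs are below) =====
def Claim_equal_count_photos : Prop := ∀ (road : String), Dom_count_photos road → Spec_count_photos road (count_photos road)

-- ===== LEMMAS AND PROOFS =====

-- common reference: the count contributed by l when '>'-so-far = r and '.'-so-far = p
def cpRef (l : List Char) (r p : Int) : Int :=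
  match l with
  | [] => 0
  | c :: t =>
    if c = '>' then cpRef t (r + 1) p
    else if c = '<' then p + cpRef t r p
    else if c = '.' then r + cpRef t r (p + 1)
    else cpRef t r p

theorem cpA_ref (l : List Char) (r lf p c : Int) :
    (l.foldl
      (fun (st : Int × Int × Int × Int) i =>
        let (right, left, period, count) := st
        if i = '>' then (right + 1, left, period, count)
        else if i = '<' then (right, left + 1, period, count + period)
        else if i = '.' then (right, left, period + 1, count + right)
        else st)
      (r, lf, p, c)).2.2.2 = c + cpRef l r p := by
  induction l generalizing r lf p c with
  | nil => simp [cpRef]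
  | cons x t ih =>
    by_cases h1 : x = '>' <;> by_cases h2 : x = '<' <;> by_cases h3 : x = '.' <;>
      simp_all [cpRef, List.foldl] <;> ring

theorem cpB_ref (l : List Char) (r p t0 : Int) :
    ((l.zip ((l.scanl (fun a c => a + (if c = '>' then (1 : Int) else 0)) r).zip
             (l.scanl (fun a c => a + (if c = '.' then (1 : Int) else 0)) p))).foldl
      (fun (total : Int) crp =>
        if crp.1 = '.' then total + crp.2.1
        else if crp.1 = '<' then total + crp.2.2
        else total)
      t0) = t0 + cpRef l r p := by
  induction l generalizing r p t0 with
  | nil => simp [cpRef]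
  | cons x t ih =>
    by_cases h1 : x = '>' <;> by_cases h2 : x = '<' <;> by_cases h3 : x = '.' <;>
      simp_all [cpRef, List.scanl, List.zip] <;> ring

-- ===== VERDICT (by name: the statement is the Claim_ definition above) =====
theorem count_photos_spec : Claim_equal_count_photos := by
  intro road _
  unfold Spec_count_photos count_photos count_photos_alt
  rw [cpA_ref, cpB_ref]
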